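-- pv_equiv track=rewrite | github.com/JohnMuirhead2000/sportsBetting | store_data.py | get_all_recent
-- ===== SOURCE A (Python) =====
-- def get_all_recent(date, a_list):
--     final_list = []
--     total = 0
--     for i in range(len(a_list)):
--         if a_list[i][0] >= date:
--             if total != 0:
--                 return i, final_list
--             else:
--                 return None, None
--         else:
--             total = total + 1
--             final_list.append(a_list[i][1])
--     return None, None
-- ===== SOURCE B (Python) =====
-- def get_all_recent(date, a_list):
--     index = next((i for i, x in enumerate(a_list) if x[0] >= date), None)
--     if index is None or index == 0:
--         return None, None
--     return index, [x[1] for x in a_list[:index]]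
-- ===== Notes on version B (the rewrite author's own statement) =====
-- stated objective: simpler
-- what changed: Replaces A's interleaved accumulate-and-stop loop with mutable counters by a boundary-find pass (next over enumerate) followed by a prefix comprehension.
import Mathlib
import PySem

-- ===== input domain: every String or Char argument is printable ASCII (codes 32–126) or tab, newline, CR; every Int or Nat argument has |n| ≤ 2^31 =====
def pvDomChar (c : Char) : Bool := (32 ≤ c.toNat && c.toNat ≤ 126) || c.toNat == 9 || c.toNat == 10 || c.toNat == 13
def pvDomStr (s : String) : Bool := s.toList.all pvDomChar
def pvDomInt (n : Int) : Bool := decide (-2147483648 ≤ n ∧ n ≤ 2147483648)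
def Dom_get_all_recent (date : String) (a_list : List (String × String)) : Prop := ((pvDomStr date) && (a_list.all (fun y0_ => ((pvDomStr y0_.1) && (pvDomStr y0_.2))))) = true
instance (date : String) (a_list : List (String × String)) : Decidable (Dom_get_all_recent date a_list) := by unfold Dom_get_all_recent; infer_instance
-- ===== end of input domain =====

-- B replaces A's single interleaved accumulate-and-stop loop by a boundary-find pass (findIdx?) followed
-- by a prefix map; simpler decomposition, same O(n) cost.


-- ===== PORT A =====
-- A's loop over range(len(a_list)) carrying the accumulator final_list and the counter total;
-- i is the current index, total the count of rows already appended.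
def get_all_recent_go (date : String) (rest : List (String × String)) (i : Nat)
    (total : Nat) (final_list : List String) : Option Int × Option (List String) :=
  match rest with
  | [] => (none, none)
  | x :: xs =>
    if date ≤ x.1 then
      if total ≠ 0 then (some (i : Int), some final_list) else (none, none)
    else
      get_all_recent_go date xs (i + 1) (total + 1) (final_list ++ [x.2])

def get_all_recent (date : String) (a_list : List (String × String)) : Option Int × Option (List String) :=
  get_all_recent_go date a_list 0 0 []

-- ===== PORT B =====
-- index = next((i for i,x in enumerate(a_list) if x[0] >= date), None); then prefix comprehension.
def get_all_recent_alt (date : String) (a_list : List (String × String)) : Option Int × Option (List String) :=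
  match a_list.findIdx? (fun x => date ≤ x.1) with
  | none => (none, none)
  | some 0 => (none, none)
  | some i => (some (i : Int), some ((a_list.take i).map Prod.snd))

-- ===== PRECONDITION & SPEC =====
def Spec_get_all_recent (date : String) (a_list : List (String × String)) (out : Option Int × Option (List String)) : Prop := out = get_all_recent_alt date a_list
instance (date : String) (a_list : List (String × String)) (out : Option Int × Option (List String)) : Decidable (Spec_get_all_recent date a_list out) := by unfold Spec_get_all_recent; infer_instance

-- ===== CLAIM (what is proved, stated in full; the proofs are below) =====
def Claim_equal_get_all_recent : Prop := ∀ (date : String) (a_list : List (String × String)), Dom_get_all_recent date a_list → Spec_get_all_recent date a_list (get_all_recent date a_list)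

-- ===== LEMMAS AND PROOFS =====

lemma get_all_recent_go_eq (date : String) :
    ∀ (xs : List (String × String)) (n : Nat) (acc : List String),
    get_all_recent_go date xs n n acc =
      match xs.findIdx? (fun x => date ≤ x.1) with
      | none => (none, none)
      | some j =>
        if n + j = 0 then (none, none)
        else (some ((n + j : Nat) : Int), some (acc ++ (xs.take j).map Prod.snd)) := by
  intro xs
  induction xs with
  | nil => intro n acc; simp [get_all_recent_go]
  | cons x xs ih =>
    intro n acc
    rw [List.findIdx?_cons]
    by_cases h : date ≤ x.1
    · rcases n with _ | m
      · simp [get_all_recent_go, h]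
      · simp [get_all_recent_go, h]
    · rw [show (decide (date ≤ x.1)) = false from decide_eq_false h]
      simp only [Bool.false_eq_true, if_false]
      simp only [get_all_recent_go, if_neg h]
      rw [ih (n + 1) (acc ++ [x.2])]
      cases hf : xs.findIdx? (fun x => date ≤ x.1) with
      | none => simp
      | some j =>
        simp only [Option.map_some]
        have h1 : n + 1 + j = n + (j + 1) := by omega
        have h2 : n + (j + 1) ≠ 0 := by omega
        have h3 : n + 1 + j ≠ 0 := by omega
        simp only [if_neg h2, if_neg h3, List.take_succ_cons, List.map_cons, h1]
        simp

-- ===== VERDICT (by name: the statement is the Claim_ definition above) =====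
theorem get_all_recent_spec : Claim_equal_get_all_recent := by
  intro date a_list _
  unfold Spec_get_all_recent get_all_recent get_all_recent_alt
  rw [get_all_recent_go_eq]
  cases hf : a_list.findIdx? (fun x => date ≤ x.1) with
  | none => rfl
  | some j =>
    rcases j with _ | m
    · simp
    · simp
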